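-- pv_equiv track=rewrite | github.com/k0ste/irq-tune | irq-tune.py | total_mask
-- ===== SOURCE A (Python) =====
-- def get_mask(selectedcpu):
--
--     cpumask = ""
--     for cpu in range(0, 48):
--         if(cpu == selectedcpu):
--             cpumask = "1" + cpumask
--         else:
--             cpumask = "0" + cpumask
--     return cpumask
--
-- def add_commas(mask):
--
--     split_mask = [mask[x:x + 8] for x in range(0, len(mask), 8)]
--     comma_sep = ""
--     for i in range(0, len(split_mask)):
--         if (i < 1):
--             comma_sep = split_mask[i]
--         else:
--             comma_sep = comma_sep + "," + split_mask[i]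
--     return comma_sep
--
-- def total_mask(cpulist, masktype):
--
--     masklist = []
--     formatted_mask = ""
--     for cpu in cpulist:
--         masklist.append(get_mask(cpu))
--     ormask = int(0)
--     for mask in masklist:
--         ormask = ormask | int(mask, 2)
--     if masktype == "binary":
--         formatted_mask = format(ormask, '048b')
--     else:
--         formatted_mask = format(ormask, '016x')
--     return add_commas(formatted_mask)
-- ===== SOURCE B (Python) =====
-- def add_commas(mask):
--
--     split_mask = [mask[x:x + 8] for x in range(0, len(mask), 8)]
--     comma_sep = ""
--     for i in range(0, len(split_mask)):
--         if (i < 1):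
--             comma_sep = split_mask[i]
--         else:
--             comma_sep = comma_sep + "," + split_mask[i]
--     return comma_sep
--
-- def total_mask(cpulist, masktype):
--
--     ormask = 0
--     for cpu in cpulist:
--         if 0 <= cpu < 48:
--             ormask |= 1 << cpu
--     if masktype == "binary":
--         formatted_mask = format(ormask, '048b')
--     else:
--         formatted_mask = format(ormask, '016x')
--     return add_commas(formatted_mask)
-- ===== Notes on version B (the rewrite author's own statement) =====
-- stated objective: faster
-- what changed: Replaces the per-cpu construction of 48-character '0'/'1' strings and their int(mask,2) re-parse with a single integer fold that ORs 1<<cpu for each in-range cpu; the format branch and add_commas are kept.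
import Mathlib
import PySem

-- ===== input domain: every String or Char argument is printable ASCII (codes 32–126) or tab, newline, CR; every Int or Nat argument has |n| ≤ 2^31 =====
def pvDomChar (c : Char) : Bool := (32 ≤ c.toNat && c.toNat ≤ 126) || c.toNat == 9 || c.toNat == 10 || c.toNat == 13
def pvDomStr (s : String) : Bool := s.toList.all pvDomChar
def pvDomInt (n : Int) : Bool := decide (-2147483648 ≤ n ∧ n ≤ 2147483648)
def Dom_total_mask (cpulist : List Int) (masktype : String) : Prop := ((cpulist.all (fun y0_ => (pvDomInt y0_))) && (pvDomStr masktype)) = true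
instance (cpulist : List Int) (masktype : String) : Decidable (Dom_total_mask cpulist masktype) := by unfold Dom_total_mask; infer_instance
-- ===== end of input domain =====

-- B replaces A's per-cpu 48-char string building and int(mask,2) re-parsing by a single
-- integer fold ORing 1<<cpu for in-range cpus (simpler); formatting/comma helpers are shared.


-- ===== shared helpers (ports of Python built-ins / the module helper both Source A and Source B call) =====
-- format(n, '048b') for n ≥ 0 (the only values reaching it): binary digits zero-padded to 48
def fmt048b (n : Int) : String := String.ofList (PySem.Chars.zfill (PySem.Int.toBinChars n) 48)
-- format(n, '016x') for n ≥ 0: lowercase hex digits (Nat.toDigits 16 matches Python's lowercase) zero-padded to 16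
def fmt016x (n : Int) : String := String.ofList (PySem.Chars.zfill (Nat.toDigits 16 n.toNat) 16)
-- add_commas, transliterated: slices of 8 joined by the indexed loop (split_mask[i] always in range,
-- so .getD "" is never the default)
def add_commas (mask : String) : String :=
  let split_mask := (PySem.List.pyRange 0 (PySem.Str.len mask) 8).map
    (fun x => PySem.Str.slice mask (some x) (some (x + 8)))
  (PySem.List.pyRange 0 (Int.ofNat split_mask.length) 1).foldl
    (fun comma_sep i =>
      if i < 1 then (PySem.List.pyGet? split_mask i).getD ""
      else comma_sep ++ "," ++ (PySem.List.pyGet? split_mask i).getD "") ""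

-- ===== PORT A =====
-- get_mask: prepend '1'/'0' for each cpu in range(0, 48)
def get_mask (selectedcpu : Int) : String :=
  String.ofList ((PySem.List.pyRange 0 48 1).foldl
    (fun cpumask cpu => (if cpu == selectedcpu then '1' else '0') :: cpumask) [])

def total_mask (cpulist : List Int) (masktype : String) : String :=
  let masklist := cpulist.foldl (fun l cpu => l ++ [get_mask cpu]) []
  -- int(mask, 2): ofCharsBase? is exact; get_mask yields only '0'/'1', so `none` (ValueError) never occurs
  let ormask : Int := masklist.foldl
    (fun orm mask => PySem.Int.bor orm ((PySem.Int.ofCharsBase? mask.toList 2).getD 0)) 0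
  let formatted_mask := if masktype == "binary" then fmt048b ormask else fmt016x ormask
  add_commas formatted_mask

-- ===== PORT B =====
def total_mask_alt (cpulist : List Int) (masktype : String) : String :=
  let ormask : Int := cpulist.foldl
    (fun (m : Int) (cpu : Int) => if 0 ≤ cpu ∧ cpu < 48 then PySem.Int.bor m ((1 : Int) <<< cpu.toNat) else m) 0
  let formatted_mask := if masktype == "binary" then fmt048b ormask else fmt016x ormask
  add_commas formatted_mask

-- ===== PRECONDITION & SPEC =====
def Spec_total_mask (cpulist : List Int) (masktype : String) (out : String) : Prop := out = total_mask_alt cpulist masktype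
instance (cpulist : List Int) (masktype : String) (out : String) : Decidable (Spec_total_mask cpulist masktype out) := by unfold Spec_total_mask; infer_instance

-- ===== CLAIM (what is proved, stated in full; the proofs are below) =====
def Claim_equal_total_mask : Prop := ∀ (cpulist : List Int) (masktype : String), Dom_total_mask cpulist masktype → Spec_total_mask cpulist masktype (total_mask cpulist masktype)

-- ===== LEMMAS AND PROOFS =====
-- the in-range case of parse∘get_mask, checked for all 48 cpus at once
theorem parse_get_mask_inRange : ∀ k : Fin 48,
    (PySem.Int.ofCharsBase? (get_mask (k.val : Int)).toList 2).getD 0 = (1 : Int) <<< k.val := by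
  decide

-- the prepend loop with an everywhere-'0' bit produces replicate
theorem foldl_bit_all_zero (c : Int) (l : List Int) (acc : List Char)
    (h : ∀ x ∈ l, (x == c) = false) :
    l.foldl (fun a x => (if x == c then '1' else '0') :: a) acc
      = List.replicate l.length '0' ++ acc := by
  induction l generalizing acc with
  | nil => rfl
  | cons y ys ih =>
      simp only [List.foldl_cons, List.length_cons]
      rw [h y (List.mem_cons_self), ih _ (fun x hx => h x (List.mem_cons_of_mem _ hx)),
        if_neg (by simp), List.replicate_succ']
      simp

theorem get_mask_out_of_range (c : Int) (h : ¬ (0 ≤ c ∧ c < 48)) :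
    (get_mask c).toList = List.replicate 48 '0' := by
  show (String.ofList ((PySem.List.pyRange 0 48 1).foldl
      (fun cpumask cpu => (if cpu == c then '1' else '0') :: cpumask) [])).toList = _
  rw [foldl_bit_all_zero c _ []]
  · rfl
  · intro x hx
    have hb := PySem.List.mem_pyRange_one.mp hx
    simp only [beq_eq_false_iff_ne, ne_eq]
    omega

-- the value A ORs in for one cpu equals the value B ORs in
theorem parse_get_mask (c : Int) :
    (PySem.Int.ofCharsBase? (get_mask c).toList 2).getD 0
      = if 0 ≤ c ∧ c < 48 then (1 : Int) <<< c.toNat else 0 := by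
  by_cases h : 0 ≤ c ∧ c < 48
  · rw [if_pos h]
    have h1 : (PySem.Int.ofCharsBase? (get_mask ((c.toNat : Nat) : Int)).toList 2).getD 0
        = (1 : Int) <<< c.toNat := parse_get_mask_inRange ⟨c.toNat, by omega⟩
    rwa [Int.toNat_of_nonneg h.1] at h1
  · rw [if_neg h, get_mask_out_of_range c h]
    decide

theorem ormask_eq (cpulist : List Int) :
    (cpulist.foldl (fun l cpu => l ++ [get_mask cpu]) []).foldl
        (fun orm mask => PySem.Int.bor orm ((PySem.Int.ofCharsBase? mask.toList 2).getD 0)) 0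
      = cpulist.foldl
        (fun (m : Int) (cpu : Int) => if 0 ≤ cpu ∧ cpu < 48 then PySem.Int.bor m ((1 : Int) <<< cpu.toNat) else m) 0 := by
  rw [PySem.List.foldl_append_singleton_eq_map get_mask cpulist [], List.nil_append, List.foldl_map]
  have hf : (fun orm cpu => PySem.Int.bor orm ((PySem.Int.ofCharsBase? (get_mask cpu).toList 2).getD 0))
      = fun (m : Int) (cpu : Int) =>
          if 0 ≤ cpu ∧ cpu < 48 then PySem.Int.bor m ((1 : Int) <<< cpu.toNat) else m := by
    funext m cpu
    rw [parse_get_mask cpu]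
    split
    · rfl
    · exact PySem.Int.bor_zero m
  rw [hf]

-- ===== VERDICT (by name: the statement is the Claim_ definition above) =====
theorem total_mask_spec : Claim_equal_total_mask := by
  intro cpulist masktype _
  show total_mask cpulist masktype = total_mask_alt cpulist masktype
  simp only [total_mask, total_mask_alt]
  rw [ormask_eq]
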